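-- pv_equiv track=rewrite | github.com/iRatG/signal-mind | analytics/generate_report.py | bucket_outcomes
-- ===== SOURCE A (Python) =====
-- BUCKET = 50  # iterations per bucket for outcome chart
--
-- def bucket_outcomes(tels, size=BUCKET):
--     buckets, labels = [], []
--     for i in range(0, len(tels), size):
--         chunk = tels[i:i+size]
--         c = sum(1 for t in chunk if t.get("confirmed") is True)
--         p = sum(1 for t in chunk if t.get("confirmed") is None)
--         r = sum(1 for t in chunk if t.get("confirmed") is False)
--         buckets.append((c, p, r))
--         labels.append(f"{i+1}-{i+len(chunk)}")
--     return labels, buckets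
-- ===== SOURCE B (Python) =====
-- BUCKET = 50  # iterations per bucket for outcome chart
--
-- def bucket_outcomes(tels, size=BUCKET):
--     # single counting pass keyed by idx // size, labels built afterwards
--     if size <= 0:
--         return [], []
--     n = len(tels)
--     nb = (n + size - 1) // size
--     counts = [(0, 0, 0) for _ in range(nb)]
--     for idx, t in enumerate(tels):
--         b = idx // size
--         c, p, r = counts[b]
--         v = t.get("confirmed")
--         if v is True:
--             counts[b] = (c + 1, p, r)
--         elif v is None:
--             counts[b] = (c, p + 1, r)
--         else:
--             counts[b] = (c, p, r + 1)
--     labels = [f"{b*size+1}-{min((b+1)*size, n)}" for b in range(nb)]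
--     return labels, counts
-- ===== Notes on version B (the rewrite author's own statement) =====
-- stated objective: alternative
-- what changed: Replaces A's per-chunk rescanning (slice each bucket, then three separate counting passes over it) with one linear pass over enumerate(tels) that increments a (confirmed, pending, rejected) triple at bucket idx//size, building the labels afterwards from the bucket count in closed form.
import Mathlib
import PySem

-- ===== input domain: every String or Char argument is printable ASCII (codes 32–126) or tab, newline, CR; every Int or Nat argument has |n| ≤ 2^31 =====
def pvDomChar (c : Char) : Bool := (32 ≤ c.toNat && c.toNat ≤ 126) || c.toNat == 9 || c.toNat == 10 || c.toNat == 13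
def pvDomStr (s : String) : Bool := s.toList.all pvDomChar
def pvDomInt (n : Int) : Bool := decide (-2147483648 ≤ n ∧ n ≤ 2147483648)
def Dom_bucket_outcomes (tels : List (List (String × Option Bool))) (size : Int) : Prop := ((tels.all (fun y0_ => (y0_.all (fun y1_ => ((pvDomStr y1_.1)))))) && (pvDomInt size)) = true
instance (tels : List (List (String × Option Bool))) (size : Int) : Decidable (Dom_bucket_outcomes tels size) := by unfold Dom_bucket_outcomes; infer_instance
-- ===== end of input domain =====

-- B replaces A's per-chunk slicing-and-three-counting-passes by one linear pass over
-- enumerate(tels) keyed by idx // size, with labels built afterwards in closed form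
-- (objective: alternative; same asymptotic cost). Pre_ excludes size = 0, where A raises ValueError.


-- ===== PORT A =====
-- t.get("confirmed") under the type convention: dict = association list (first match),
-- Python's value space {True, False, None} = Option Bool (missing key and stored None
-- are both Python None, hence the .join).
def getConfirmed (t : List (String × Option Bool)) : Option Bool :=
  ((t.find? (fun q => q.1 == "confirmed")).map (·.2)).join

def bucket_outcomes (tels : List (List (String × Option Bool))) (size : Int) : List String × (List (Int × Int × Int)) :=
  (PySem.List.pyRange 0 (tels.length : Int) size).foldl
    (fun acc i =>
      let chunk := PySem.List.slice tels (some i) (some (i + size))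
      let c : Int := chunk.foldl (fun a t => if getConfirmed t = some true then a + 1 else a) 0
      let p : Int := chunk.foldl (fun a t => if getConfirmed t = none then a + 1 else a) 0
      let r : Int := chunk.foldl (fun a t => if getConfirmed t = some false then a + 1 else a) 0
      (acc.1 ++ [PySem.Int.toStr (i + 1) ++ "-" ++ PySem.Int.toStr (i + (chunk.length : Int))],
       acc.2 ++ [(c, p, r)]))
    ([], [])


-- ===== PORT B =====
-- the if/elif/else body of Source B's loop, as a named helper
def updConf (t : List (String × Option Bool)) (c : Int × Int × Int) : Int × Int × Int :=
  match getConfirmed t with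
  | some true  => (c.1 + 1, c.2.1, c.2.2)
  | none       => (c.1, c.2.1 + 1, c.2.2)
  | some false => (c.1, c.2.1, c.2.2 + 1)

def bucket_outcomes_alt (tels : List (List (String × Option Bool))) (size : Int) : List String × (List (Int × Int × Int)) :=
  if size ≤ 0 then ([], []) else
    let n : Int := (tels.length : Int)
    let nb : Int := PySem.Int.floordiv (n + size - 1) size
    let counts0 : List (Int × Int × Int) := (PySem.List.pyRange 0 nb 1).map (fun _ => (0, 0, 0))
    let counts := (PySem.List.enumerate tels).foldl
      (fun cs q => cs.modify (PySem.Int.floordiv q.1 size).toNat (updConf q.2))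
      counts0
    let labels := (PySem.List.pyRange 0 nb 1).map
      (fun b => PySem.Int.toStr (b * size + 1) ++ "-" ++ PySem.Int.toStr (min ((b + 1) * size) n))
    (labels, counts)

-- ===== PRECONDITION & SPEC =====
-- Pre_ excludes only size = 0, where Python A raises ValueError (range() arg 3 must not be zero).
def Pre_bucket_outcomes (tels : List (List (String × Option Bool))) (size : Int) : Prop := size ≠ 0
instance (tels : List (List (String × Option Bool))) (size : Int) : Decidable (Pre_bucket_outcomes tels size) := by unfold Pre_bucket_outcomes; infer_instance
def pvWitness_bucket_outcomes : (List (List (String × Option Bool))) × Int :=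
  ([[("confirmed", some true)], [("confirmed", none)], []], 2)

def Spec_bucket_outcomes (tels : List (List (String × Option Bool))) (size : Int) (out : List String × (List (Int × Int × Int))) : Prop := out = bucket_outcomes_alt tels size
instance (tels : List (List (String × Option Bool))) (size : Int) (out : List String × (List (Int × Int × Int))) : Decidable (Spec_bucket_outcomes tels size out) := by unfold Spec_bucket_outcomes; infer_instance

-- ===== CLAIM (what is proved, stated in full; the proofs are below) =====
def Claim_equal_bucket_outcomes : Prop := ∀ (tels : List (List (String × Option Bool))) (size : Int), Dom_bucket_outcomes tels size → Pre_bucket_outcomes tels size → Spec_bucket_outcomes tels size (bucket_outcomes tels size)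

-- ===== LEMMAS AND PROOFS =====
theorem foldl_modify_getElem? {T C : Type} (l : List T) (bkt : T → Nat) (upd : T → C → C)
    (cs : List C) (j : Nat) (hj : j < cs.length) :
    (l.foldl (fun cs q => cs.modify (bkt q) (upd q)) cs)[j]? =
      some (l.foldl (fun x q => if bkt q = j then upd q x else x) cs[j]) := by
  induction l generalizing cs with
  | nil => simp [List.getElem?_eq_getElem hj]
  | cons a l ih =>
    rw [List.foldl_cons, List.foldl_cons,
      ih _ (by simpa using hj)]
    rw [List.getElem_modify]

theorem foldl_enumerate_snd {T C : Type} (l : List T) (st : Int) (f : C → T → C) (x0 : C) :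
    (PySem.List.enumerate l st).foldl (fun x q => f x q.2) x0 = l.foldl f x0 := by
  induction l generalizing st x0 with
  | nil => simp [PySem.List.enumerate]
  | cons a l ih => rw [PySem.List.enumerate_cons, List.foldl_cons, List.foldl_cons, ih]

theorem filtered_fold {T C : Type} (tels : List T) (size : Int) (hpos : 0 < size) (j : Nat)
    (hjn : size * (j : Int) < (tels.length : Int)) (upd : T → C → C) (x0 : C) :
    (PySem.List.enumerate tels 0).foldl
      (fun x q => if (PySem.Int.floordiv q.1 size).toNat = j then upd q.2 x else x) x0
    = ((tels.drop (size.toNat * j)).take size.toNat).foldl (fun x t => upd t x) x0 := by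
  set sn := size.toNat with hsn
  have hsval : (sn : Int) = size := Int.toNat_of_nonneg (le_of_lt hpos)
  have hsnpos : 0 < sn := by omega
  have h1 : sn * j ≤ tels.length := by
    have : ((sn * j : Nat) : Int) < (tels.length : Int) := by push_cast; rw [hsval]; exact hjn
    exact_mod_cast le_of_lt this
  have e2 : (tels.drop (sn * j)).drop sn = tels.drop (sn * j + sn) := by
    rw [List.drop_drop]
  have hsplit : tels = tels.take (sn * j) ++ ((tels.drop (sn * j)).take sn ++ tels.drop (sn * j + sn)) := by
    rw [← e2, List.take_append_drop, List.take_append_drop]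
  have hlen1 : (tels.take (sn * j)).length = sn * j := by
    simp [List.length_take]; omega
  have hclen : ((tels.drop (sn * j)).take sn).length = min sn (tels.length - sn * j) := by
    simp [List.length_take, List.length_drop]
  have hseg1 : ∀ (acc : C), ∀ p ∈ PySem.List.enumerate (tels.take (sn * j)) 0,
      (if (PySem.Int.floordiv p.1 size).toNat = j then upd p.2 acc else acc) = acc := by
    intro acc p hp
    rw [PySem.List.mem_enumerate_iff] at hp
    obtain ⟨k, hk, rfl⟩ := hp
    rw [hlen1] at hk
    dsimp only
    have hlt : PySem.Int.floordiv ((0 : Int) + (k : Int)) size < (j : Int) := by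
      rw [PySem.Int.floordiv_eq_ediv_of_pos hpos, Int.ediv_lt_iff_lt_mul hpos]
      nlinarith [hsval]
    have h0 : (0 : Int) ≤ PySem.Int.floordiv ((0 : Int) + (k : Int)) size := by
      rw [PySem.Int.floordiv_eq_ediv_of_pos hpos]
      positivity
    rw [if_neg (by omega)]
  have hseg2 : ∀ (acc : C), ∀ p ∈ PySem.List.enumerate ((tels.drop (sn * j)).take sn)
        (0 + ((tels.take (sn * j)).length : Int)),
      (if (PySem.Int.floordiv p.1 size).toNat = j then upd p.2 acc else acc) = upd p.2 acc := by
    intro acc p hp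
    rw [PySem.List.mem_enumerate_iff] at hp
    obtain ⟨k, hk, rfl⟩ := hp
    rw [hclen] at hk
    dsimp only
    have hidx : (0 : Int) + ((tels.take (sn * j)).length : Int) + (k : Int) = ((sn * j + k : Nat) : Int) := by
      rw [hlen1]; push_cast; ring
    rw [hidx]
    have hkj : k < sn := by omega
    have heq : PySem.Int.floordiv ((sn * j + k : Nat) : Int) size = (j : Int) := by
      rw [PySem.Int.floordiv_eq_iff_of_pos hpos]
      constructor
      · push_cast; nlinarith [hsval]
      · push_cast; nlinarith [hsval]
    rw [heq]
    rw [if_pos (by omega)]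
  have hseg3 : ∀ (acc : C), ∀ p ∈ PySem.List.enumerate (tels.drop (sn * j + sn))
        (0 + ((tels.take (sn * j)).length : Int) + (((tels.drop (sn * j)).take sn).length : Int)),
      (if (PySem.Int.floordiv p.1 size).toNat = j then upd p.2 acc else acc) = acc := by
    intro acc p hp
    rw [PySem.List.mem_enumerate_iff] at hp
    obtain ⟨k, hk, rfl⟩ := hp
    rw [List.length_drop] at hk
    dsimp only
    have hc : ((tels.drop (sn * j)).take sn).length = sn := by rw [hclen]; omega
    have hidx : (0 : Int) + ((tels.take (sn * j)).length : Int) + (((tels.drop (sn * j)).take sn).length : Int) + (k : Int)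
        = ((sn * j + sn + k : Nat) : Int) := by
      rw [hlen1, hc]; push_cast; ring
    rw [hidx]
    have hge : (j : Int) + 1 ≤ PySem.Int.floordiv ((sn * j + sn + k : Nat) : Int) size := by
      rw [PySem.Int.floordiv_eq_ediv_of_pos hpos, Int.le_ediv_iff_mul_le hpos]
      push_cast
      nlinarith [hsval]
    have h0 : (0 : Int) ≤ PySem.Int.floordiv ((sn * j + sn + k : Nat) : Int) size := by omega
    rw [if_neg (by omega)]
  conv_lhs => rw [hsplit]
  rw [PySem.List.enumerate_append, PySem.List.enumerate_append, List.foldl_append, List.foldl_append]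
  rw [PySem.List.foldl_congr_mem _ _ (fun x _ => x) x0 hseg1, List.foldl_fixed]
  rw [PySem.List.foldl_congr_mem _ _ (fun x q => upd q.2 x) x0 hseg2]
  rw [foldl_enumerate_snd _ _ (fun x t => upd t x) x0]
  rw [PySem.List.foldl_congr_mem _ _ (fun x _ => x) _ hseg3, List.foldl_fixed]


theorem fold3 (l : List (List (String × Option Bool))) (c0 p0 r0 : Int) :
    l.foldl (fun (x : Int × Int × Int) t => updConf t x) (c0, p0, r0)
    = (l.foldl (fun a t => if getConfirmed t = some true then a + 1 else a) c0,
       l.foldl (fun a t => if getConfirmed t = none then a + 1 else a) p0,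
       l.foldl (fun a t => if getConfirmed t = some false then a + 1 else a) r0) := by
  induction l generalizing c0 p0 r0 with
  | nil => rfl
  | cons a l ih =>
    rcases h : getConfirmed a with _ | b
    · have h1 : updConf a (c0, p0, r0) = (c0, p0 + 1, r0) := by simp [updConf, h]
      simp only [List.foldl_cons, h1, h]
      simpa using ih c0 (p0 + 1) r0
    · cases b
      · have h1 : updConf a (c0, p0, r0) = (c0, p0, r0 + 1) := by simp [updConf, h]
        simp only [List.foldl_cons, h1, h]
        simpa using ih c0 p0 (r0 + 1)
      · have h1 : updConf a (c0, p0, r0) = (c0 + 1, p0, r0) := by simp [updConf, h]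
        simp only [List.foldl_cons, h1, h]
        simpa using ih (c0 + 1) p0 r0

theorem length_foldl_modify {T C : Type} (l : List T) (bkt : T → Nat) (upd : T → C → C) (cs : List C) :
    (l.foldl (fun cs q => cs.modify (bkt q) (upd q)) cs).length = cs.length := by
  induction l generalizing cs with
  | nil => rfl
  | cons a l ih => rw [List.foldl_cons, ih, List.length_modify]

theorem main_eq (tels : List (List (String × Option Bool))) (size : Int) (h : size ≠ 0) :
    bucket_outcomes tels size = bucket_outcomes_alt tels size := by
  rcases lt_or_gt_of_ne h with hneg | hpos
  · -- size < 0 : A's range is empty, B's guard fires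
    have hr : PySem.List.pyRange 0 (tels.length : Int) size = [] := by
      unfold PySem.List.pyRange
      rw [if_neg h]
      simp only []
      rw [if_neg (by omega), if_neg (by omega)]
      simp
    simp only [bucket_outcomes, bucket_outcomes_alt, hr]
    rw [if_pos (le_of_lt hneg)]
    rfl
  · -- 0 < size
    have hs0 : (0 : Int) ≤ size := le_of_lt hpos
    set sn := size.toNat with hsn
    have hsval : (sn : Int) = size := Int.toNat_of_nonneg hs0
    have hsnpos : 0 < sn := by omega
    set n' := tels.length with hn'
    set N := ((((n' : Int)) + size - 1) / size).toNat with hN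
    have hNnn : (0 : Int) ≤ ((n' : Int) + size - 1) / size := by
      apply Int.ediv_nonneg _ hs0; omega
    have hNval : (N : Int) = ((n' : Int) + size - 1) / size := Int.toNat_of_nonneg hNnn
    -- every k < N has size*k < n'
    have hklt : ∀ k : Nat, k < N → size * (k : Int) < (n' : Int) := by
      intro k hk
      have hk1 : ((k : Int) + 1) * size ≤ (n' : Int) + size - 1 := by
        rw [← Int.le_ediv_iff_mul_le hpos, ← hNval]
        exact_mod_cast hk
      nlinarith
    -- A as a pair of maps over range N
    have hrange : PySem.List.pyRange 0 ((n' : Int)) size = (List.range N).map (fun (k : Nat) => (0 : Int) + size * (k : Int)) := by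
      rw [PySem.List.pyRange_of_pos _ _ hpos]
      have hcnt : (if (0 : Int) < (n' : Int) then (((n' : Int) - 0 + size - 1) / size).toNat else 0) = N := by
        split_ifs with h0
        · rw [hN]
          norm_num
        · have hn0 : (n' : Int) = 0 := by omega
          have hz : ((n' : Int) + size - 1) / size = 0 := by
            rw [hn0]
            apply Int.ediv_eq_zero_of_lt (by omega) (by omega)
          rw [hN, hz]
          rfl
      rw [hcnt]
    simp only [bucket_outcomes, bucket_outcomes_alt]
    rw [if_neg (by omega)]
    rw [hrange]
    rw [PySem.List.foldl_prod_mk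
      (fun (x : List String) (i : Int) =>
        x ++ [PySem.Int.toStr (i + 1) ++ "-" ++
          PySem.Int.toStr (i + ((PySem.List.slice tels (some i) (some (i + size))).length : Int))])
      (fun (x : List (Int × Int × Int)) (i : Int) =>
        x ++ [(List.foldl (fun a t => if getConfirmed t = some true then a + 1 else a) (0 : Int)
                (PySem.List.slice tels (some i) (some (i + size))),
              List.foldl (fun a t => if getConfirmed t = none then a + 1 else a) (0 : Int)
                (PySem.List.slice tels (some i) (some (i + size))),
              List.foldl (fun a t => if getConfirmed t = some false then a + 1 else a) (0 : Int)
                (PySem.List.slice tels (some i) (some (i + size))))])]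
    rw [PySem.List.foldl_append_singleton_eq_map, PySem.List.foldl_append_singleton_eq_map]
    simp only [List.nil_append, List.map_map]
    -- chunk identification
    have hchunk : ∀ k : Nat, k < N →
        PySem.List.slice tels (some (0 + size * (k : Int))) (some (0 + size * (k : Int) + size))
          = (tels.drop (sn * k)).take sn := by
      intro k hk
      have ha : (0 : Int) + size * (k : Int) = ((sn * k : Nat) : Int) := by push_cast; rw [hsval]; ring
      have hb : (0 : Int) + size * (k : Int) + size = ((sn * k + sn : Nat) : Int) := by push_cast; rw [hsval]; ring
      rw [hb, ha, PySem.List.slice_natCast]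
      congr 1
      generalize sn * k = m
      omega
    have hnb : (PySem.Int.floordiv ((n' : Int) + size - 1) size - 0).toNat = N := by
      rw [PySem.Int.floordiv_eq_ediv_of_pos hpos]
      omega
    have hrange1 : PySem.List.pyRange 0 (PySem.Int.floordiv ((n' : Int) + size - 1) size) 1
        = (List.range N).map (fun (k : Nat) => (0 : Int) + (k : Int)) := by
      rw [PySem.List.pyRange_one, hnb]
    rw [← hn', hrange1]
    simp only [List.map_map]
    have hc0len : ((List.range N).map (fun _ => ((0 : Int), (0 : Int), (0 : Int)))).length = N := by simp
    refine Prod.ext ?_ ?_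
    · -- labels
      dsimp only
      apply List.map_congr_left
      intro k hk
      rw [List.mem_range] at hk
      simp only [Function.comp_def]
      rw [hchunk k hk]
      have e1 : (0 : Int) + size * (k : Int) + 1 = (0 + (k : Int)) * size + 1 := by ring
      have hm := hklt k hk
      have hsk : size * (k : Int) = ((sn * k : Nat) : Int) := by push_cast; rw [hsval]
      have e3 : ((0 : Int) + (k : Int) + 1) * size = ((sn * k + sn : Nat) : Int) := by
        push_cast; rw [hsval]; ring
      have e2 : (0 : Int) + size * (k : Int) + (((tels.drop (sn * k)).take sn).length : Int)
          = min (((0 : Int) + (k : Int) + 1) * size) ((n' : Int)) := by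
        rw [e3, hsk]
        simp only [List.length_take, List.length_drop, ← hn']
        rw [hsk] at hm
        generalize hg : sn * k = m at *
        push_cast
        omega
      rw [e1, e2]
    · -- counts
      dsimp only
      simp only [Function.comp_def]
      apply List.ext_getElem?
      intro jj
      by_cases hjj : jj < N
      · have hj0 : jj < ((List.range N).map (fun (_ : Nat) => ((0:Int), (0:Int), (0:Int)))).length := by
          simpa using hjj
        have hfold : ∀ (cs : List (Int × Int × Int)) (hj : jj < cs.length),
            ((PySem.List.enumerate tels).foldl
              (fun (cs : List (Int × Int × Int)) (q : Int × List (String × Option Bool)) => cs.modify (PySem.Int.floordiv q.1 size).toNat (updConf q.2)) cs)[jj]?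
            = some ((PySem.List.enumerate tels).foldl
                (fun (x : Int × Int × Int) (q : Int × List (String × Option Bool)) => if (PySem.Int.floordiv q.1 size).toNat = jj then updConf q.2 x else x) cs[jj]) :=
          fun cs hj => foldl_modify_getElem? _
            (fun (q : Int × List (String × Option Bool)) => (PySem.Int.floordiv q.1 size).toNat)
            (fun (q : Int × List (String × Option Bool)) => updConf q.2) cs jj hj
        rw [hfold _ hj0]
        have hcs0 : ((List.range N).map (fun (_ : Nat) => ((0:Int), (0:Int), (0:Int))))[jj] = ((0:Int), (0:Int), (0:Int)) := by
          simp
        rw [hcs0]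
        have hff := filtered_fold tels size hpos jj (by rw [← hn']; exact hklt jj hjj) updConf ((0:Int), (0:Int), (0:Int))
        rw [hff, fold3]
        simp only [List.getElem?_map, List.getElem?_range hjj, Option.map_some]
        rw [hchunk jj hjj]
      · rw [List.getElem?_eq_none, List.getElem?_eq_none]
        · rw [length_foldl_modify]
          simpa using not_lt.mp hjj
        · simpa using not_lt.mp hjj

-- ===== VERDICT (by name: the statement is the Claim_ definition above) =====
theorem bucket_outcomes_spec : Claim_equal_bucket_outcomes := by
  intro tels size _ hpre
  unfold Spec_bucket_outcomes
  exact main_eq tels size hpre
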